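-- pv_equiv track=rewrite | github.com/George-King-123/WXML-Extremal-Groups | MessingWithZ2.py | conj
-- ===== SOURCE A (Python) =====
-- from math import comb
--
-- def conj(n, k, t):
--   res = comb(n + (k - t) - 1, k - t- 1)
--   for i in range(1, n+1):
--     cur_term = comb(i - i//2 + t - 1, t-1) * comb(i//2 + t - 1, t-1)
--     j_sum = 0
--     for j in range(0, n-i+1):
--       j_sum += comb(j + (k - t) - 1, (k - t) - 1) * comb(n -i - j + (k - t) -1, (k - t) - 1)
--     cur_term *= j_sum
--     res += cur_term
--   return res
-- ===== SOURCE B (Python) =====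
-- from math import comb
--
-- def conj(n, k, t):
--     # Vandermonde convolution closes A's inner j-loop:
--     #   sum_{j=0}^{s} C(j+m-1, m-1) * C(s-j+m-1, m-1) = C(s+2m-1, 2m-1)
--     m = k - t
--     res = comb(n + m - 1, m - 1)
--     for i in range(1, n + 1):
--         res += (comb(i - i // 2 + t - 1, t - 1)
--                 * comb(i // 2 + t - 1, t - 1)
--                 * comb(n - i + 2 * m - 1, 2 * m - 1))
--     return res
-- ===== Notes on version B (the rewrite author's own statement) =====
-- stated objective: faster
-- what changed: The inner convolution sum over j is replaced by a single binomial coefficient via the Vandermonde identity, turning A's nested double loop into one loop: O(n) instead of O(n^2) comb evaluations.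
import Mathlib
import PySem

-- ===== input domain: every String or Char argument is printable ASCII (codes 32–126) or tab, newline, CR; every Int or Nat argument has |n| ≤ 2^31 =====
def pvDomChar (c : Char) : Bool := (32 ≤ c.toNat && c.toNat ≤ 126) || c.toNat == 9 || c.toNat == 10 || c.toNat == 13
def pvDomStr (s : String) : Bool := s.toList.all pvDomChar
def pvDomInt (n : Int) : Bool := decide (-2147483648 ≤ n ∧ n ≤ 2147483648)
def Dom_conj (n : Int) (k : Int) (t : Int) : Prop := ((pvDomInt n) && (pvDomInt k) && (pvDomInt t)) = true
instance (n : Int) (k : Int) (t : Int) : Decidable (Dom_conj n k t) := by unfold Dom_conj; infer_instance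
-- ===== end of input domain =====

-- B closes A's inner Vandermonde convolution into a single binomial coefficient (one loop instead of two).

-- math.comb(a, b): exact for 0 ≤ a, 0 ≤ b (including the b > a → 0 case); like CPython it is
-- computed multiplicatively over min(b, a-b) factors (each division is exact). On negative
-- arguments Python raises ValueError — those inputs are excluded by Pre_conj, the port returns 0.
def combGo (a' : Nat) : Nat → Nat
  | 0 => 1
  | i + 1 => combGo a' i * (a' + i + 1) / (i + 1)

def pyCombNat (a b : Nat) : Nat :=
  if b ≤ a then combGo (a - min b (a - b)) (min b (a - b)) else 0

def pyComb (a b : Int) : Int := if 0 ≤ a ∧ 0 ≤ b then (pyCombNat a.toNat b.toNat : Int) else 0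

-- ===== PORT A =====
def conj (n : Int) (k : Int) (t : Int) : Int :=
  let res := pyComb (n + (k - t) - 1) (k - t - 1)
  (PySem.List.pyRange 1 (n + 1) 1).foldl (fun res i =>
    let cur_term := pyComb (i - PySem.Int.floordiv i 2 + t - 1) (t - 1) *
                    pyComb (PySem.Int.floordiv i 2 + t - 1) (t - 1)
    let j_sum := (PySem.List.pyRange 0 (n - i + 1) 1).foldl (fun j_sum j =>
      j_sum + pyComb (j + (k - t) - 1) (k - t - 1) * pyComb (n - i - j + (k - t) - 1) (k - t - 1)) 0
    res + cur_term * j_sum) res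

-- ===== PORT B =====
def conj_alt (n : Int) (k : Int) (t : Int) : Int :=
  let m := k - t
  let res := pyComb (n + m - 1) (m - 1)
  (PySem.List.pyRange 1 (n + 1) 1).foldl (fun res i =>
    res + pyComb (i - PySem.Int.floordiv i 2 + t - 1) (t - 1) *
          pyComb (PySem.Int.floordiv i 2 + t - 1) (t - 1) *
          pyComb (n - i + 2 * m - 1) (2 * m - 1)) res

-- ===== PRECONDITION & SPEC =====
-- Exactly the inputs on which Python A returns (elsewhere math.comb gets a negative argument
-- and raises ValueError): k - t ≥ 1, n + (k - t) ≥ 1, and t ≥ 1 whenever the loop runs.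
def Pre_conj (n : Int) (k : Int) (t : Int) : Prop :=
  1 ≤ k - t ∧ 1 ≤ n + (k - t) ∧ (1 ≤ n → 1 ≤ t)
instance (n : Int) (k : Int) (t : Int) : Decidable (Pre_conj n k t) := by
  unfold Pre_conj; infer_instance
def pvWitness_conj : Int × Int × Int := (3, 5, 2)

def Spec_conj (n : Int) (k : Int) (t : Int) (out : Int) : Prop := out = conj_alt n k t
instance (n : Int) (k : Int) (t : Int) (out : Int) : Decidable (Spec_conj n k t out) := by
  unfold Spec_conj; infer_instance

-- ===== CLAIM (what is proved, stated in full; the proofs are below) =====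
def Claim_equal_conj : Prop := ∀ (n : Int) (k : Int) (t : Int),
  Dom_conj n k t → Pre_conj n k t → Spec_conj n k t (conj n k t)

-- ===== LEMMAS AND PROOFS =====

-- ((List.range N).map f).sum as a Finset.range sum
lemma list_range_map_sum {M : Type} [AddCommMonoid M] (f : ℕ → M) (N : ℕ) :
    ((List.range N).map f).sum = ∑ j ∈ Finset.range N, f j := by
  induction N with
  | zero => simp
  | succ N ih => rw [List.range_succ, Finset.sum_range_succ]; simp [ih]

-- hockey stick: ∑_{j≤s} C(a+j, a) = C(a+1+s, a+1)
lemma hockey (a s : ℕ) :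
    ∑ j ∈ Finset.range (s + 1), (a + j).choose a = (a + 1 + s).choose (a + 1) := by
  induction s with
  | zero => simp
  | succ s ih =>
      rw [Finset.sum_range_succ, ih]
      have h := Nat.choose_succ_succ (a + 1 + s) a
      simp only [Nat.succ_eq_add_one] at h
      have e : (a + 1 + (s + 1)).choose (a + 1) = ((a + 1 + s) + 1).choose (a + 1) := by
        congr 1
      have e2 : (a + (s + 1)).choose a = (a + 1 + s).choose a := by
        congr 1; omega
      rw [e, h, e2]
      omega

-- Vandermonde convolution (negative-upper-index form):
-- ∑_{j≤s} C(a+j, a) C(b+(s-j), b) = C(a+b+1+s, a+b+1)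
lemma conv (a b : ℕ) : ∀ s : ℕ,
    ∑ j ∈ Finset.range (s + 1), (a + j).choose a * (b + (s - j)).choose b
      = (a + b + 1 + s).choose (a + b + 1) := by
  induction b with
  | zero =>
      intro s
      simp only [Nat.zero_add, Nat.add_zero, Nat.choose_zero_right, Nat.mul_one]
      exact hockey a s
  | succ b ihb =>
      intro s
      induction s with
      | zero => simp
      | succ s ihs =>
          have split : ∀ j ∈ Finset.range (s + 2),
              (a + j).choose a * (b + 1 + (s + 1 - j)).choose (b + 1)
              = (a + j).choose a * (b + (s + 1 - j)).choose (b + 1)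
                + (a + j).choose a * (b + (s + 1 - j)).choose b := by
            intro j hj
            have e : b + 1 + (s + 1 - j) = (b + (s + 1 - j)) + 1 := by omega
            have h := Nat.choose_succ_succ (b + (s + 1 - j)) b
            simp only [Nat.succ_eq_add_one] at h
            rw [e, h, Nat.mul_add]
            omega
          rw [Finset.sum_congr rfl split, Finset.sum_add_distrib]
          have first : ∑ j ∈ Finset.range (s + 2),
              (a + j).choose a * (b + (s + 1 - j)).choose (b + 1)
              = ∑ j ∈ Finset.range (s + 1),
                  (a + j).choose a * (b + 1 + (s - j)).choose (b + 1) := by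
            rw [Finset.sum_range_succ]
            have z : (b + (s + 1 - (s + 1))).choose (b + 1) = 0 := by
              apply Nat.choose_eq_zero_of_lt; omega
            rw [z, Nat.mul_zero, Nat.add_zero]
            refine Finset.sum_congr rfl ?_
            intro j hj
            have hj' : j ≤ s := by simpa [Nat.lt_succ_iff] using hj
            congr 2
            omega
          rw [first, ihs, ihb (s + 1)]
          have h := Nat.choose_succ_succ (a + (b + 1) + 1 + s) (a + (b + 1))
          simp only [Nat.succ_eq_add_one] at h
          have e1 : (a + (b + 1) + 1 + (s + 1)).choose (a + (b + 1) + 1)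
              = ((a + (b + 1) + 1 + s) + 1).choose (a + (b + 1) + 1) := by
            congr 1
          have e2 : (a + b + 1 + (s + 1)).choose (a + b + 1)
              = (a + (b + 1) + 1 + s).choose (a + (b + 1)) := by
            congr 1
            omega
          rw [e1, h, e2]
          omega

-- the multiplicative loop computes the binomial coefficient
lemma combGo_eq (a' : Nat) : ∀ i : Nat, combGo a' i = (a' + i).choose i := by
  intro i
  induction i with
  | zero => simp [combGo]
  | succ i ih =>
      rw [combGo, ih]
      have h := Nat.add_one_mul_choose_eq (a' + i) i
      have e : (a' + i).choose i * (a' + i + 1) = (a' + (i + 1)).choose (i + 1) * (i + 1) := by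
        rw [Nat.mul_comm, h]
        congr 2
      rw [e, Nat.mul_div_cancel _ (by omega)]

lemma pyCombNat_eq_choose (a b : Nat) : pyCombNat a b = a.choose b := by
  unfold pyCombNat
  split
  · rename_i hba
    rw [combGo_eq]
    rcases Nat.le_total b (a - b) with h | h
    · have e : a - min b (a - b) + min b (a - b) = a := by omega
      have em : min b (a - b) = b := by omega
      rw [em] at e ⊢
      rw [e]
    · have em : min b (a - b) = a - b := by omega
      have e : a - min b (a - b) + min b (a - b) = a := by omega
      rw [em] at e ⊢
      rw [e]
      exact Nat.choose_symm hba
  · rename_i hba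
    exact (Nat.choose_eq_zero_of_lt (by omega)).symm

-- pyComb on nonnegative arguments
lemma pyComb_nonneg (a b : Int) (ha : 0 ≤ a) (hb : 0 ≤ b) :
    pyComb a b = (Nat.choose a.toNat b.toNat : Int) := by
  simp [pyComb, ha, hb, pyCombNat_eq_choose]

-- the inner j-loop of A equals one binomial coefficient
lemma inner_eq (m s : Int) (hm : 1 ≤ m) (hs : 0 ≤ s) :
    (PySem.List.pyRange 0 (s + 1) 1).foldl (fun acc j =>
        acc + pyComb (j + m - 1) (m - 1) * pyComb (s - j + m - 1) (m - 1)) 0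
      = pyComb (s + 2 * m - 1) (2 * m - 1) := by
  rw [PySem.List.foldl_add (g := fun j =>
        pyComb (j + m - 1) (m - 1) * pyComb (s - j + m - 1) (m - 1))]
  rw [PySem.List.pyRange_one]
  have hlen : (s + 1 - 0).toNat = s.toNat + 1 := by omega
  rw [hlen, List.map_map, zero_add]
  set a := (m - 1).toNat with ha
  set N := s.toNat with hN
  have step : ∀ j ∈ List.range (N + 1),
      ((fun j : Int => pyComb (j + m - 1) (m - 1) * pyComb (s - j + m - 1) (m - 1)) ∘
        (fun k : ℕ => (0 : Int) + k)) j
      = (((a + j).choose a * (a + (N - j)).choose a : ℕ) : Int) := by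
    intro j hj
    have hj' : j ≤ N := by simpa [Nat.lt_succ_iff] using hj
    simp only [Function.comp_apply, zero_add]
    rw [pyComb_nonneg _ _ (by omega) (by omega), pyComb_nonneg _ _ (by omega) (by omega)]
    have e1 : ((j : Int) + m - 1).toNat = a + j := by omega
    have e2 : ((m : Int) - 1).toNat = a := by omega
    have e3 : (s - (j : Int) + m - 1).toNat = a + (N - j) := by omega
    rw [e1, e2, e3]
    push_cast
    ring
  rw [List.map_congr_left step, list_range_map_sum]
  rw [← Nat.cast_sum, conv a a N]
  rw [pyComb_nonneg _ _ (by omega) (by omega)]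
  have e4 : (s + 2 * m - 1).toNat = a + a + 1 + N := by omega
  have e5 : (2 * m - 1).toNat = a + a + 1 := by omega
  rw [e4, e5]

-- ===== VERDICT (by name: the statement is the Claim_ definition above) =====
theorem conj_spec : Claim_equal_conj := by
  intro n k t _ hpre
  obtain ⟨hm, hnm, hnt⟩ := hpre
  unfold Spec_conj conj conj_alt
  simp only []
  apply PySem.List.foldl_congr_mem
  intro acc i hi
  rw [PySem.List.mem_pyRange_one] at hi
  rw [inner_eq (k - t) (n - i) hm (by omega)]
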